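-- pv_equiv track=rewrite | github.com/jpbascur/citation_clusters_evaluation | functions_iterative_clustering.py | t_Positive_Clusters_Dict
-- ===== SOURCE A (Python) =====
-- def t_Positive_Clusters_Dict(t_references_d, clu_d):
--     """Create the dictionary of positive clusters
--
--     Parameters
--     ----------
--     t_references_d : dict of set
--         The key is the topic and the value is the set of references of the topic. The references are int type.
--
--     clu_d : dict of set
--         The key is the cluster id and the value is the set of nodes in the cluster. The nodes are int type.
--
--     Returns
--     -------
--     t_positive_clusters_d : dict of dict
--         The first key is the topic, the second key is the cluster id and the third key is the set of intersected documents.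
--         There are no recorded clusters with empty intersections in the dictionary.
--
--     Notes
--     -------
--     The function intersects the references of each topic with the nodes of each cluster. If a cluster have no intersection,
--     then it is not recorded in t_positive_clusters_d.
--     """
--     t_positive_clusters_d = {}
--     for t in t_references_d:
--         t_positive_clusters_d[t] = {}
--         references_set = t_references_d[t]
--         for c in clu_d:
--             cluster_set = clu_d[c]
--             intersection_set = references_set.intersection(cluster_set)
--             if len(intersection_set) > 0:
--                 t_positive_clusters_d[t][c] = intersection_set
--     return t_positive_clusters_d
-- ===== SOURCE B (Python) =====
-- def t_Positive_Clusters_Dict(t_references_d, clu_d):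
--     """Same result, computed via an inverted node->clusters index:
--     each topic's references are scanned once, accumulating per-cluster
--     intersection buckets, instead of intersecting every topic with every
--     cluster."""
--     node_clusters = {}
--     for c in clu_d:
--         for n in clu_d[c]:
--             node_clusters.setdefault(n, []).append(c)
--     out = {}
--     no_clusters = ()
--     for t in t_references_d:
--         buckets = {}
--         for r in t_references_d[t]:
--             for c in node_clusters.get(r, no_clusters):
--                 buckets.setdefault(c, set()).add(r)
--         out[t] = {c: buckets[c] for c in clu_d if c in buckets}
--     return out
-- ===== Notes on version B (the rewrite author's own statement) =====
-- stated objective: alternative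
-- what changed: Replaces the topic-by-cluster double loop of set intersections with an inverted node-to-clusters index built once, so each topic's references are scanned a single time to accumulate per-cluster intersection buckets.
import Mathlib
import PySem

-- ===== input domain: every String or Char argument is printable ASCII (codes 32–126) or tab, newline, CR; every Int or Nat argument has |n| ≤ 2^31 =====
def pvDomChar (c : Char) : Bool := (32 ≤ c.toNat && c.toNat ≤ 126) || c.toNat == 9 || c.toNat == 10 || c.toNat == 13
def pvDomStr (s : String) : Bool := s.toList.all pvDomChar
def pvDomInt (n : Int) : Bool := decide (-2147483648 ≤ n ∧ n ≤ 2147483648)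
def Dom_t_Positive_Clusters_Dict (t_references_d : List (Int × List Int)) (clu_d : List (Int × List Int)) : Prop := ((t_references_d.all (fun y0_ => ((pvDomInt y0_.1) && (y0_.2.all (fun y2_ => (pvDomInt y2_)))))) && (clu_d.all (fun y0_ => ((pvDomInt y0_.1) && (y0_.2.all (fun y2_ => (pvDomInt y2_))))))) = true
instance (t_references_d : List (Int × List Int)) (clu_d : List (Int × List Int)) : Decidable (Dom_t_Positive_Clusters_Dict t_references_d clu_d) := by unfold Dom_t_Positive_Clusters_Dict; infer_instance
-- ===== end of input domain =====

-- B replaces A's topic-by-cluster double loop of set intersections with an inverted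
-- node-to-clusters index, scanning each topic's references once (objective: alternative).

-- both parameters are Python dicts of sets handed over as association lists:
-- decode once (later duplicate keys overwrite in place, set values deduplicate)
def pvAsPyDict (d : List (Int × List Int)) : PySem.Dict Int (List Int) :=
  PySem.Dict.ofList (d.map (fun p => (p.1, PySem.Set.ofList p.2)))

-- ===== PORT A =====
def t_Positive_Clusters_Dict (t_references_d : List (Int × List Int)) (clu_d : List (Int × List Int)) : List (Int × List (Int × List Int)) :=
  let trd := pvAsPyDict t_references_d
  let clud := pvAsPyDict clu_d
  -- for t in t_references_d: … for c in clu_d: intersect, record if nonempty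
  (trd.items.foldl
    (fun out p =>
      out.insert p.1
        ((clud.items.foldl
          (fun inn q =>
            let intersection_set := PySem.Set.inter p.2 q.2
            if 0 < intersection_set.length then inn.insert q.1 intersection_set else inn)
          (PySem.Dict.empty : PySem.Dict Int (List Int))).items))
    (PySem.Dict.empty : PySem.Dict Int (List (Int × List Int)))).items

-- ===== PORT B =====
-- node_clusters: for c in clu_d: for n in clu_d[c]: node_clusters.setdefault(n, []).append(c)
def pvNodeClusters (items : List (Int × List Int)) : PySem.Dict Int (List Int) :=
  items.foldl
    (fun d q => q.2.foldl (fun d n => d.modify n [] (fun cs => cs ++ [q.1])) d)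
    PySem.Dict.empty

-- buckets: for r in refs: for c in node_clusters.get(r, ()): buckets.setdefault(c, set()).add(r)
def pvBuckets (idx : PySem.Dict Int (List Int)) (refs : List Int) : PySem.Dict Int (List Int) :=
  refs.foldl
    (fun b r => (idx.getD r []).foldl (fun b c => b.modify c [] (fun s => PySem.Set.add s r)) b)
    PySem.Dict.empty

def t_Positive_Clusters_Dict_alt (t_references_d : List (Int × List Int)) (clu_d : List (Int × List Int)) : List (Int × List (Int × List Int)) :=
  let clud := pvAsPyDict clu_d
  let idx := pvNodeClusters clud.items
  -- out[t] = {c: buckets[c] for c in clu_d if c in buckets}  (topic keys are distinct, so a map is exact)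
  (pvAsPyDict t_references_d).items.map (fun p =>
    let b := pvBuckets idx p.2
    (p.1, clud.items.foldl (fun inn q => if b.contains q.1 then inn ++ [(q.1, b.getD q.1 [])] else inn) []))

-- ===== PRECONDITION & SPEC =====
def Spec_t_Positive_Clusters_Dict (t_references_d : List (Int × List Int)) (clu_d : List (Int × List Int)) (out : List (Int × List (Int × List Int))) : Prop := out = t_Positive_Clusters_Dict_alt t_references_d clu_d
instance (t_references_d : List (Int × List Int)) (clu_d : List (Int × List Int)) (out : List (Int × List (Int × List Int))) : Decidable (Spec_t_Positive_Clusters_Dict t_references_d clu_d out) := by unfold Spec_t_Positive_Clusters_Dict; infer_instance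

-- ===== CLAIM (what is proved, stated in full; the proofs are below) =====
def Claim_equal_t_Positive_Clusters_Dict : Prop := ∀ (t_references_d : List (Int × List Int)) (clu_d : List (Int × List Int)), Dom_t_Positive_Clusters_Dict t_references_d clu_d → Spec_t_Positive_Clusters_Dict t_references_d clu_d (t_Positive_Clusters_Dict t_references_d clu_d)

-- ===== LEMMAS AND PROOFS =====

-- every value stored in a decoded dict is one of the listed values
lemma pv_values_mem (ps : List (Int × List Int)) (d : PySem.Dict Int (List Int)) (v : List Int)
    (h : v ∈ (ps.foldl (fun acc p => acc.insert p.1 p.2) d).values) :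
    v ∈ d.values ∨ v ∈ ps.map (·.2) := by
  induction ps generalizing d with
  | nil => exact Or.inl h
  | cons p ps ih =>
    rcases ih _ h with h' | h'
    · rcases PySem.Dict.mem_values_insert d p.1 p.2 v (by exact h') with h'' | h''
      · exact Or.inr (by simp [h''])
      · exact Or.inl h''
    · exact Or.inr (by simp [List.mem_map] at h' ⊢; tauto)

-- decoded set values are duplicate-free
lemma pv_values_nodup (xs : List (Int × List Int)) (q : Int × List Int)
    (hq : q ∈ (pvAsPyDict xs).items) : q.2.Nodup := by
  have hv : q.2 ∈ (pvAsPyDict xs).values := by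
    simp only [PySem.Dict.values, List.mem_map]; exact ⟨q, hq, rfl⟩
  have := pv_values_mem _ _ _ (by simpa [pvAsPyDict, PySem.Dict.ofList, PySem.Dict.update] using hv)
  rcases this with h | h
  · simp [PySem.Dict.empty, PySem.Dict.values] at h
  · simp only [List.map_map, List.mem_map] at h
    rcases h with ⟨p, _, hp⟩
    rw [← hp]
    exact PySem.Set.nodup_ofList p.2

-- shared combinator: filtering the flattened (element, tag) pairs by the first
-- component recovers, per source item, the tag iff the element occurs (Nodup sources)
lemma pv_flat_filter {α : Type} (l : List α) (g : α → List Int) (f : α → Int) (a : Int)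
    (hnd : ∀ x ∈ l, (g x).Nodup) :
    ((l.flatMap (fun x => (g x).map (fun y => (y, f x)))).filter (fun pr => pr.1 == a)).map (·.2)
      = (l.filter (fun x => decide (a ∈ g x))).map f := by
  induction l with
  | nil => simp
  | cons x l ih =>
    have hx := hnd x (by simp)
    have ih' := ih (fun y hy => hnd y (by simp [hy]))
    simp only [List.flatMap_cons, List.filter_append, List.map_append, ih', List.filter_cons]
    have hhead : (((g x).map (fun y => (y, f x))).filter (fun pr => pr.1 == a)).map (·.2)
        = if a ∈ g x then [f x] else [] := by
      rw [List.filter_map]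
      have : ((fun pr : Int × Int => pr.1 == a) ∘ fun y => (y, f x)) = fun y => y == a := rfl
      rw [this, List.filter_beq]
      by_cases h : a ∈ g x
      · rw [List.count_eq_one_of_mem hx h]; simp [h]
      · rw [List.count_eq_zero_of_not_mem h]; simp [h]
    rw [hhead]
    by_cases h : a ∈ g x <;> simp [h]

-- fold of modify-with-Set.add, getD shape
lemma pv_getD_foldl_modify_add (L : List (Int × Int)) (d : PySem.Dict Int (List Int)) (c : Int) :
    (L.foldl (fun d pr => d.modify pr.1 [] (fun s => PySem.Set.add s pr.2)) d).getD c []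
      = PySem.Set.update (d.getD c []) ((L.filter (fun pr => pr.1 == c)).map (·.2)) := by
  induction L generalizing d with
  | nil => simp [PySem.Set.update]
  | cons pr L ih =>
    rw [List.foldl_cons, ih, List.filter_cons]
    by_cases h : pr.1 = c
    · simp only [h, beq_self_eq_true, if_pos, List.map_cons, PySem.Set.update_cons]
      have : (d.modify c [] (fun s => PySem.Set.add s pr.2)).getD c [] = PySem.Set.add (d.getD c []) pr.2 := by
        rw [PySem.Dict.getD_modify]; simp
      rw [this]
    · have hb : (pr.1 == c) = false := by simp [h]
      simp only [hb, if_neg, Bool.false_eq_true, not_false_iff]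
      have : (d.modify pr.1 [] (fun s => PySem.Set.add s pr.2)).getD c [] = d.getD c [] := by
        rw [PySem.Dict.getD_modify]; simp [Ne.symm h]
      rw [this]

-- the two nested loops of B, flattened over the (element, tag) pair lists
lemma pv_idx_eq (items : List (Int × List Int)) :
    pvNodeClusters items
      = (items.flatMap (fun q => q.2.map (fun n => (n, q.1)))).foldl
          (fun d pr => d.modify pr.1 [] (fun cs => cs ++ [pr.2])) PySem.Dict.empty := by
  unfold pvNodeClusters
  rw [List.foldl_flatMap]
  apply PySem.List.foldl_congr_mem
  intro acc q _
  rw [List.foldl_map]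

lemma pv_buckets_eq (idx : PySem.Dict Int (List Int)) (refs : List Int) :
    pvBuckets idx refs
      = (refs.flatMap (fun r => (idx.getD r []).map (fun c => (c, r)))).foldl
          (fun b pr => b.modify pr.1 [] (fun s => PySem.Set.add s pr.2)) PySem.Dict.empty := by
  unfold pvBuckets
  rw [List.foldl_flatMap]
  apply PySem.List.foldl_congr_mem
  intro acc r _
  rw [List.foldl_map]

-- characterisation of the inverted index
lemma pv_idx_getD (items : List (Int × List Int)) (r : Int)
    (hnd : ∀ q ∈ items, q.2.Nodup) :
    (pvNodeClusters items).getD r [] = (items.filter (fun q => decide (r ∈ q.2))).map (·.1) := by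
  rw [pv_idx_eq, PySem.Dict.getD_foldl_modify_append]
  simp only [PySem.Dict.getD_empty, List.nil_append]
  exact pv_flat_filter items (fun q => q.2) (fun q => q.1) r hnd

-- characterisation of a topic's buckets
lemma pv_buckets_getD (idx : PySem.Dict Int (List Int)) (refs : List Int) (c : Int)
    (hr : refs.Nodup) (hidx : ∀ r ∈ refs, (idx.getD r []).Nodup) :
    (pvBuckets idx refs).getD c [] = refs.filter (fun r => decide (c ∈ idx.getD r [])) := by
  rw [pv_buckets_eq, pv_getD_foldl_modify_add]
  simp only [PySem.Dict.getD_empty]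
  rw [PySem.Set.update_nil_left]
  rw [pv_flat_filter refs (fun r => idx.getD r []) (fun r => r) c hidx]
  simp only [List.map_id']
  exact PySem.Set.ofList_eq_self_of_nodup _ (List.Nodup.filter _ hr)

lemma pv_buckets_contains (idx : PySem.Dict Int (List Int)) (refs : List Int) (c : Int) :
    (pvBuckets idx refs).contains c = decide (∃ r ∈ refs, c ∈ idx.getD r []) := by
  rw [pv_buckets_eq, PySem.Dict.contains_eq_decide_mem_keys]
  rw [PySem.Dict.keys_foldl_modify_key _ Prod.fst [] (fun _ pr s => PySem.Set.add s pr.2) PySem.Dict.empty]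
  simp only [PySem.Dict.keys_empty, PySem.Set.update_nil_left]
  apply decide_eq_decide.mpr
  simp only [PySem.Set.mem_ofList, List.mem_map, List.mem_flatMap]
  constructor
  · rintro ⟨pr, ⟨r, hr, hpr⟩, h1⟩
    rcases hpr with ⟨c', hc', rfl⟩
    exact ⟨r, hr, by simpa [← h1] using hc'⟩
  · rintro ⟨r, hr, hc⟩
    exact ⟨(c, r), ⟨r, hr, ⟨c, hc, rfl⟩⟩, rfl⟩

-- the dicts decoded by pvAsPyDict have duplicate-free key lists
lemma pv_keys_nodup (xs : List (Int × List Int)) : ((pvAsPyDict xs).items.map (·.1)).Nodup := by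
  have := PySem.Dict.nodup_keys_ofList (xs.map (fun p => (p.1, PySem.Set.ofList p.2)))
  simpa [pvAsPyDict, PySem.Dict.keys] using this

-- ===== VERDICT (by name: the statement is the Claim_ definition above) =====
theorem t_Positive_Clusters_Dict_spec : Claim_equal_t_Positive_Clusters_Dict := by
  intro tr clu _
  show t_Positive_Clusters_Dict tr clu = t_Positive_Clusters_Dict_alt tr clu
  have hKeysClu := pv_keys_nodup clu
  have hValClu : ∀ q ∈ (pvAsPyDict clu).items, q.2.Nodup := fun q hq => pv_values_nodup clu q hq
  have hidxN : ∀ r : Int, ((pvNodeClusters (pvAsPyDict clu).items).getD r []).Nodup := by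
    intro r
    rw [pv_idx_getD _ _ hValClu]
    exact (List.Sublist.map _ List.filter_sublist).nodup hKeysClu
  have hM : ∀ q ∈ (pvAsPyDict clu).items, ∀ r : Int,
      (q.1 ∈ (pvNodeClusters (pvAsPyDict clu).items).getD r []) ↔ r ∈ q.2 := by
    intro q hq r
    rw [pv_idx_getD _ _ hValClu]
    simp only [List.mem_map, List.mem_filter, decide_eq_true_eq]
    constructor
    · rintro ⟨q', ⟨hq', hrq'⟩, hfst⟩
      have := List.inj_on_of_nodup_map hKeysClu hq' hq hfst
      rwa [← this]
    · intro h; exact ⟨q, ⟨hq, h⟩, rfl⟩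
  unfold t_Positive_Clusters_Dict t_Positive_Clusters_Dict_alt
  simp only []
  rw [PySem.Dict.items_foldl_insert_fresh (pvAsPyDict tr).items (fun p => p.1)
        (fun p => (List.foldl
            (fun inn q =>
              if 0 < (PySem.Set.inter p.2 q.2).length then inn.insert q.1 (PySem.Set.inter p.2 q.2) else inn)
            PySem.Dict.empty (pvAsPyDict clu).items).items)
        PySem.Dict.empty (fun a _ => by simp) (pv_keys_nodup tr)]
  simp only [show (PySem.Dict.empty : PySem.Dict Int (List (Int × List Int))).items = [] from rfl,
    List.nil_append]
  apply List.map_congr_left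
  intro p hp
  have hrefs : p.2.Nodup := pv_values_nodup tr p hp
  -- A's inner loop: filter the clusters, then insert fresh keys
  rw [PySem.List.foldl_ite_eq_foldl_filter
        (p := fun q : Int × List Int => 0 < (PySem.Set.inter p.2 q.2).length)
        (f := fun inn q => inn.insert q.1 (PySem.Set.inter p.2 q.2))
        (l := (pvAsPyDict clu).items) (init := PySem.Dict.empty)]
  rw [PySem.Dict.items_foldl_insert_fresh
        ((pvAsPyDict clu).items.filter
          (fun q => decide (0 < (PySem.Set.inter p.2 q.2).length)))
        (fun q => q.1) (fun q => PySem.Set.inter p.2 q.2)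
        PySem.Dict.empty (fun a _ => by simp)
        ((List.Sublist.map _ List.filter_sublist).nodup hKeysClu)]
  simp only [show (PySem.Dict.empty : PySem.Dict Int (List Int)).items = [] from rfl,
    List.nil_append]
  -- B's inner loop: append-if is filter + map
  rw [PySem.List.foldl_append_if _ _]
  simp only [List.nil_append]
  -- same filter …
  have hfil : (pvAsPyDict clu).items.filter
        (fun q => decide (0 < (PySem.Set.inter p.2 q.2).length))
      = (pvAsPyDict clu).items.filter
        (fun q => (pvBuckets (pvNodeClusters (pvAsPyDict clu).items) p.2).contains q.1) := by
    apply List.filter_congr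
    intro q hq
    rw [pv_buckets_contains, decide_eq_decide]
    constructor
    · intro hlen
      rcases List.length_pos_iff_exists_mem.mp hlen with ⟨r, hrmem⟩
      unfold PySem.Set.inter at hrmem
      simp only [List.mem_filter, PySem.Set.contains_iff] at hrmem
      exact ⟨r, hrmem.1, (hM q hq r).mpr hrmem.2⟩
    · rintro ⟨r, hr, hc⟩
      apply List.length_pos_iff_exists_mem.mpr
      refine ⟨r, ?_⟩
      unfold PySem.Set.inter
      simp only [List.mem_filter, PySem.Set.contains_iff]
      exact ⟨hr, (hM q hq r).mp hc⟩
  rw [← hfil]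
  -- … and the same values
  apply congrArg (Prod.mk p.1)
  apply List.map_congr_left
  intro q hq'
  have hq : q ∈ (pvAsPyDict clu).items := List.mem_of_mem_filter hq'
  apply congrArg (Prod.mk q.1)
  show PySem.Set.inter p.2 q.2
      = (pvBuckets (pvNodeClusters (pvAsPyDict clu).items) p.2).getD q.1 []
  rw [pv_buckets_getD _ _ _ hrefs (fun r _ => hidxN r)]
  unfold PySem.Set.inter
  apply List.filter_congr
  intro r _
  simp [hM q hq r]
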